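-- pv_equiv track=rewrite | github.com/caojianfeng/py_fibonacci | rabbits.py | fibos
-- ===== SOURCE A (Python) =====
-- LIMIT = 1474 #122.8年后，月数会超出这个数字，计算机也数不清有多少兔子了。
--
-- def fibos(month):
--     fibo_list = []
--     big = 0
--     small = 1
--     for i in range(0, min(month, LIMIT)):
--         fibo_list.append({'month': i+1, 'small': small, 'big': big})
--         big, small = small+big, big
--
--     return fibo_list
-- ===== SOURCE B (Python) =====
-- LIMIT = 1474
--
-- def fibos(month):
--     n = min(month, LIMIT)
--     # flat table: f[i] = fib(i-1) with f[0]=1, f[1]=0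
--     f = [1, 0]
--     while len(f) < n + 1:
--         f.append(f[-1] + f[-2])
--     return [{'month': i + 1, 'small': f[i], 'big': f[i + 1]} for i in range(n)]
-- ===== Notes on version B (the rewrite author's own statement) =====
-- stated objective: alternative
-- what changed: Replaces the single interleaved loop carrying (list, big, small) state with a flat Fibonacci table built first, followed by a separate formatting pass indexing f[i]/f[i+1].
import Mathlib
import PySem

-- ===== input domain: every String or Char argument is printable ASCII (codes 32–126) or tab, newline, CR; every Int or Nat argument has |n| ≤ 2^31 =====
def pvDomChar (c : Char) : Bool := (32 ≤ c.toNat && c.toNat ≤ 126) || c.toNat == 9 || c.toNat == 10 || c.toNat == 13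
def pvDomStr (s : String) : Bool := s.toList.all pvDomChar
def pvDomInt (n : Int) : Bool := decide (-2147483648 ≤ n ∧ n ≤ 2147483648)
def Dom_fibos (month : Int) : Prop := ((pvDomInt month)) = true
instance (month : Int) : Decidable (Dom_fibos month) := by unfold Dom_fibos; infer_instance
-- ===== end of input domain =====

-- B builds a flat Fibonacci table first and formats it in a separate pass; objective: alternative decomposition, same cost.

-- ===== PORT A =====
def fibos (month : Int) : List (List (String × Int)) :=
  (((PySem.List.pyRange 0 (min month 1474) 1).foldl
      (fun (st : List (List (String × Int)) × Int × Int) i =>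
        (st.1 ++ [[("month", i + 1), ("small", st.2.2), ("big", st.2.1)]],
         st.2.2 + st.2.1, st.2.1))
      ([], 0, 1)) : List (List (String × Int)) × Int × Int).1

-- ===== PORT B =====
-- 'while len(f) < n + 1: f.append(f[-1] + f[-2])'; f always has ≥ 2 elements, so the .getD 0 default is never used
def fibExtend (target : Int) (f : List Int) : List Int :=
  if _h : (f.length : Int) < target then
    fibExtend target (f ++ [PySem.List.pyGetD f (-1) 0 + PySem.List.pyGetD f (-2) 0])
  else f
termination_by (target - (f.length : Int)).toNat
decreasing_by simp only [List.length_append, List.length_cons, List.length_nil]; omega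

def fibos_alt (month : Int) : List (List (String × Int)) :=
  let n := min month 1474
  let f := fibExtend (n + 1) [1, 0]
  (PySem.List.pyRange 0 n 1).map (fun i =>
    [("month", i + 1), ("small", PySem.List.pyGetD f i 0), ("big", PySem.List.pyGetD f (i + 1) 0)])

-- ===== PRECONDITION & SPEC =====
def Spec_fibos (month : Int) (out : List (List (String × Int))) : Prop := out = fibos_alt month
instance (month : Int) (out : List (List (String × Int))) : Decidable (Spec_fibos month out) := by unfold Spec_fibos; infer_instance

-- ===== CLAIM (what is proved, stated in full; the proofs are below) =====
def Claim_equal_fibos : Prop := ∀ (month : Int), Dom_fibos month → Spec_fibos month (fibos month)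

-- ===== LEMMAS AND PROOFS =====

-- the shifted Fibonacci sequence both programs compute: fibF 0 = 1, fibF 1 = 0, fibF (k+2) = fibF (k+1) + fibF k
def fibF : Nat → Int
  | 0 => 1
  | 1 => 0
  | k + 2 => fibF (k + 1) + fibF k

-- one monthly record
def entryF (j : Nat) : List (String × Int) :=
  [("month", (j : Int) + 1), ("small", fibF j), ("big", fibF (j + 1))]

lemma fibExtend_range (t : Int) (d : Nat) :
    ∀ k : Nat, 2 ≤ k → (t - (k : Int)).toNat = d →
      fibExtend t ((List.range k).map fibF) = (List.range (max k t.toNat)).map fibF := by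
  induction d with
  | zero =>
    intro k hk hd
    rw [fibExtend]
    have hle : t ≤ (k : Int) := by omega
    simp only [List.length_map, List.length_range]
    rw [dif_neg (by omega)]
    have : max k t.toNat = k := by omega
    rw [this]
  | succ d ih =>
    intro k hk hd
    rw [fibExtend]
    simp only [List.length_map, List.length_range]
    by_cases hlt : (k : Int) < t
    · rw [dif_pos hlt]
      have hlen : ((List.range k).map fibF).length = k := by simp
      have h1 : PySem.List.pyGetD ((List.range k).map fibF) (-1) 0 = fibF (k - 1) := by
        rw [PySem.List.pyGetD_neg_ofNat _ 1 0 (by omega) (by omega)]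
        simp [hlen]
      have h2 : PySem.List.pyGetD ((List.range k).map fibF) (-2) 0 = fibF (k - 2) := by
        rw [PySem.List.pyGetD_neg_ofNat _ 2 0 (by omega) (by omega)]
        simp [hlen]
      have hsum : fibF (k - 1) + fibF (k - 2) = fibF k := by
        obtain ⟨m, rfl⟩ : ∃ m, k = m + 2 := ⟨k - 2, by omega⟩
        simp [fibF]
      have happ : (List.range k).map fibF ++ [fibF (k - 1) + fibF (k - 2)]
          = (List.range (k + 1)).map fibF := by
        rw [hsum, List.range_succ, List.map_append]; rfl
      rw [h1, h2, happ, ih (k + 1) (by omega) (by omega)]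
      have : max (k + 1) t.toNat = max k t.toNat := by omega
      rw [this]
    · rw [dif_neg hlt]
      omega

lemma getD_map_fibF_range (n j : Nat) (h : j < n) :
    ((List.range n).map fibF).getD j 0 = fibF j := by
  rw [List.getD_eq_getElem?_getD, List.getElem?_map, List.getElem?_range h]
  rfl

lemma loopA (m : Nat) :
    (PySem.List.pyRange 0 (m : Int) 1).foldl
      (fun (st : List (List (String × Int)) × Int × Int) i =>
        (st.1 ++ [[("month", i + 1), ("small", st.2.2), ("big", st.2.1)]],
         st.2.2 + st.2.1, st.2.1))
      ([], 0, 1)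
    = ((List.range m).map entryF, fibF (m + 1), fibF m) := by
  induction m with
  | zero => simp [PySem.List.pyRange_one_eq_nil, fibF]
  | succ m ih =>
    rw [show ((m + 1 : Nat) : Int) = (m : Int) + 1 by push_cast; ring,
        PySem.List.pyRange_one_succ_right (by positivity), List.foldl_append, ih]
    simp only [List.foldl_cons, List.foldl_nil]
    rw [List.range_succ, List.map_append]
    refine Prod.ext ?_ (Prod.ext ?_ rfl)
    · simp [entryF]
    · show fibF m + fibF (m + 1) = fibF (m + 1 + 1)
      rw [show fibF (m + 1 + 1) = fibF (m + 1) + fibF m from rfl]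
      ring

lemma tableB (m : Nat) :
    fibExtend ((m + 1 : Nat) : Int) [1, 0] = (List.range (max 2 (m + 1))).map fibF := by
  have h0 : ([1, 0] : List Int) = (List.range 2).map fibF := by decide
  rw [h0, fibExtend_range ((m + 1 : Nat) : Int) (((m + 1 : Nat) : Int) - 2).toNat 2 (le_refl 2) rfl]
  simp

lemma mapB (m : Nat) :
    (PySem.List.pyRange 0 (m : Int) 1).map (fun i =>
      [("month", i + 1),
       ("small", PySem.List.pyGetD ((List.range (max 2 (m + 1))).map fibF) i 0),
       ("big", PySem.List.pyGetD ((List.range (max 2 (m + 1))).map fibF) (i + 1) 0)])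
    = (List.range m).map entryF := by
  rw [PySem.List.pyRange_one, show ((m : Int) - 0).toNat = m by omega, List.map_map]
  apply List.map_congr_left
  intro j hj
  simp only [List.mem_range] at hj
  simp only [Function.comp_apply, zero_add, entryF]
  rw [show ((j : Int) + 1) = ((j + 1 : Nat) : Int) by push_cast; ring,
      PySem.List.pyGetD_natCast, PySem.List.pyGetD_natCast,
      getD_map_fibF_range _ _ (by omega), getD_map_fibF_range _ _ (by omega)]

-- ===== VERDICT (by name: the statement is the Claim_ definition above) =====
theorem fibos_spec : Claim_equal_fibos := by
  intro month _
  unfold Spec_fibos fibos fibos_alt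
  by_cases hn : min month 1474 <= 0
  · simp [PySem.List.pyRange_one_eq_nil hn]
  · rw [not_le] at hn
    obtain ⟨m, hm⟩ : ∃ m : Nat, min month 1474 = (m : Int) := ⟨(min month 1474).toNat, by omega⟩
    simp only [hm]
    rw [loopA m, show (m : Int) + 1 = ((m + 1 : Nat) : Int) by push_cast; ring,
        tableB m]
    exact (mapB m).symm
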